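/- GENERATED by tools/from_farm_form.py from farm/worked/realloc/Proof.lean (a worked proof of the farm's unit `realloc`,
   accepted by the verdict) — do not edit. -/
import ProgX.Base.Spec.Units.realloc
import ProgX.Base.Spec.Proved.realloc_Lemmas

open X86 X86.User Asan ProgX.Base

set_option maxRecDepth 4000
set_option maxHeartbeats 4000000

/-- **`realloc` satisfies its contract.** -/
theorem ProgX.Base.Spec.Proved.realloc_ok : ProgX.Base.Spec.realloc.Statement := by
  intro Lay hLay μ hμ u₀ hcode h_live_size h_heap_alloc h_malloc h_memcpy h_free hpoison hunpoison H rest frames n c u ret he hpre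
  have hmalloc := h_malloc H rest frames
  have hlivesize := h_live_size H n
  have halloc := h_heap_alloc H rest frames
  have hepi := ProgX.Base.Spec.Proved.realloc.realloc_epilogue_w Lay hLay μ hμ u₀ hcode H rest frames n c u ret he
  have he0 := he
  v_entry he
  obtain ⟨hp, hcase⟩ := hpre
  have hok := hp.inv.heap
  have hbase := hp.base
  have hlimit := hp.limit
  have hroom := hok.room
  rw [hbase, hlimit] at hroom
  u_walk hcode [hμ.vendor] until [ProgX.Base.L.realloc.cut3, ProgX.Base.L.realloc.cut2] span [ProgX.Base.L.textLo, ProgX.Base.L.textHi] side (v_side)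
  case call_inv =>
    v_inv
  case pre_103b84 =>
    -- `p = 0`: the precondition of `malloc(m)`
    refine hp.callee (by v_untouched) ?_ ?_ ?_ ?_
    · rw [hbase, hlimit]
      u_memnorm
      u_eqon
    · rw [w_rsp]
      u_omega
    · rw [w_rsp]
      u_omega
    · rw [w_rsp]
      u_omega
  case call_inv =>
    v_inv
  case pre_103b15 =>
    -- `p ≠ 0`: the precondition of `heap_live_size(p)`
    have hrdi : s_103b15.reg .rdi = u.reg .rdi := w_kept.get .rdi (by rfl)
    have hsame : Mem.EqOn H.base H.limit u.mem s_103b15.mem := by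
      rw [hbase, hlimit]
      u_memnorm
      u_eqon
    refine ⟨hok.eqOn hsame, hbase, ?_⟩
    rw [hrdi]
    exact (hcase.resolve_left hbr_103b10).live
  case cont =>
    -- `p = 0`, after `malloc(m)`: `mov rbp, rax`, the epilogue; the post is `malloc`'s, seen from here
    have hpost : ProgX.Spec.AllocPost H rest frames 32 (u.reg .rsi).toNat (r16 (u.reg .rsi).toNat) s_103b84 s_103b84r := by
      have this : ProgX.Spec.AllocPost H rest frames 32 (s_103b84.reg .rdi).toNat (r16 (s_103b84.reg .rdi).toNat) s_103b84 s_103b84r :=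
        w_post
      rw [w_rdi_103b84] at this
      exact this
    clear w_post
    obtain ⟨rv, hrv⟩ : ∃ rv, s_103b84r.reg .rax = rv := ⟨_, rfl⟩
    have hun : ShadowUntouched u.mem s_103b84.mem := by
      rw [w_mem_103b84]
      v_untouched
    have hstack : Mem.SameExcept [⟨(u.reg .rsp).toNat - 128, (u.reg .rsp).toNat⟩] u.mem s_103b84.mem := by
      rw [w_mem_103b84]
      u_same
    have hle : (s_103b84.reg .rsp).toNat ≤ (u.reg .rsp).toNat := by
      rw [w_rsp_103b84]
      u_omega
    have hF : (u.reg .rsp).toNat - 128 ≤ (s_103b84.reg .rsp).toNat - 32 := by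
      rw [w_rsp_103b84]
      u_omega
    v_after_call w_rsp_103b84 w_mem_103b84
    simp only [shadowSpan, Heap.next_def, hbase, w_rdi_103b84] at w_same
    have hq0 : UInt64.ofNat (s_103b84r.mem.readLE (u.reg .rsp) 8) = ret := by
      u_frame he_retAddr
    have hp1 : UInt64.ofNat (s_103b84.mem.readLE (u.reg .rsp - 8) 8) = u.reg .r13 := by u_resolve
    have hq1 : UInt64.ofNat (s_103b84r.mem.readLE (u.reg .rsp - 8) 8) = u.reg .r13 := by
      rw [w_mem_103b84] at hp1
      u_frame hp1
    have hp2 : UInt64.ofNat (s_103b84.mem.readLE (u.reg .rsp - 16) 8) = u.reg .r12 := by u_resolve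
    have hq2 : UInt64.ofNat (s_103b84r.mem.readLE (u.reg .rsp - 16) 8) = u.reg .r12 := by
      rw [w_mem_103b84] at hp2
      u_frame hp2
    have hp3 : UInt64.ofNat (s_103b84.mem.readLE (u.reg .rsp - 24) 8) = u.reg .rbp := by u_resolve
    have hq3 : UInt64.ofNat (s_103b84r.mem.readLE (u.reg .rsp - 24) 8) = u.reg .rbp := by
      rw [w_mem_103b84] at hp3
      u_frame hp3
    have hp4 : UInt64.ofNat (s_103b84.mem.readLE (u.reg .rsp - 32) 8) = u.reg .rbx := by u_resolve
    have hq4 : UInt64.ofNat (s_103b84r.mem.readLE (u.reg .rsp - 32) 8) = u.reg .rbx := by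
      rw [w_mem_103b84] at hp4
      u_frame hp4
    u_walk hcode [hμ.vendor] until [ProgX.Base.L.realloc.cut3, ProgX.Base.L.realloc.cut2] span [ProgX.Base.L.textLo, ProgX.Base.L.textHi] side (v_side)
    refine hepi s_103b8c rv w_rip w_rsp w_rbp (w_kept.mono_all (by rfl)) ?_ ?_ ?_ ?_ ?_ ?_ ?_ w_eq ?_ ?_
    · rw [w_mem]
      exact hq0
    · rw [w_mem]
      exact hq1
    · rw [w_mem]
      exact hq2
    · rw [w_mem]
      exact hq3
    · rw [w_mem]
      exact hq4
    · rw [w_flags]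
      exact w_df
    · rw [w_mxcsr]
      exact w_mx
    · simp only [X86.User.Spec.footprint, vspec, shadowSpan, Heap.next_def, hbase]
      u_same
    · intro v hvm hvr
      refine ⟨fun _ => ?_, fun hne => absurd hbr_103b10 hne⟩
      exact hpost.wrap hp hun hstack hle hF (hvm.trans w_mem) (hvr.trans hrv.symm)
  case cont =>
    -- `p ≠ 0`, after `heap_live_size(p)`: rax = n
    have hlc : H.LiveCap (u.reg .rdi).toNat n c := hcase.resolve_left hbr_103b10
    have hr := hok.obj_range hlc
    have hi := hok.obj_inside hlc
    have ha := hok.obj_aligned hlc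
    have hsc := hok.size_le_cap hlc
    obtain ⟨_, _, hcapw⟩ := hok.hdr _ hlc
    simp only at hr hi ha hsc hcapw
    rw [hbase] at hr
    rw [hlimit] at hi
    rw [ProgX.Spec.ofNat_toNat_sub _ 16 (by omega)] at hcapw
    simp only [UInt64.reduceOfNat] at hcapw
    obtain ⟨hrax, hmemeq⟩ := w_post
    rw [w_mem_103b15] at hmemeq
    obtain ⟨rv, hrv⟩ : ∃ rv, s_103b15r.reg .rax = rv := ⟨_, rfl⟩
    rw [hrv] at hrax
    v_after_call w_rsp_103b15 w_mem_103b15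
    clear w_same
    u_walk hcode [hμ.vendor] until [ProgX.Base.L.realloc.cut3, ProgX.Base.L.realloc.cut2, ProgX.Base.L.realloc.cut4, ProgX.Base.L.realloc.cut1] span [ProgX.Base.L.textLo, ProgX.Base.L.textHi] side (v_side)
    case cont =>
      -- `m > ROOM`: NULL; neither the capacity nor the heap holds `m` bytes
      have hunS : ShadowUntouched u.mem s_103bb2.mem := by v_untouched
      have hheapS : Mem.EqOn H.base H.limit u.mem s_103bb2.mem := by
        rw [hbase, hlimit]
        u_memnorm
        u_eqon
      have hstackS : Mem.SameExcept [⟨(u.reg .rsp).toNat - 128, (u.reg .rsp).toNat⟩] u.mem s_103bb2.mem := by u_same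
      have hlem := le_r16 (u.reg .rsi).toNat
      have hnf : ¬ H.Fits (r16 (u.reg .rsi).toNat) := by
        unfold Heap.Fits
        rw [hbase, hlimit]
        omega
      refine hepi s_103bb2 (Word.ofBV 0#32) w_rip w_rsp w_rbp (w_kept.mono_all (by rfl)) ?_ ?_ ?_ ?_ ?_ ?_ ?_ w_eq ?_ ?_
      · u_frame he_retAddr
      · u_resolve
      · u_resolve
      · u_resolve
      · u_resolve
      · rw [w_flags]
        simp only [X86.User.df_setStatus]
        exact w_df
      · rw [w_mxcsr]
        exact w_mx
      · simp only [X86.User.Spec.footprint, vspec, shadowSpan, Heap.next_def, hbase]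
        u_same
      · intro v hvm hvr
        have hfail : ProgX.Spec.FailPost H rest frames 128 u v := by
          refine ⟨hvr.trans rfl, ?_, ?_, ?_⟩
          · rw [hvm]
            exact hp.inv.eqOn hunS hheapS
          · rw [hvm]
            exact hunS
          · rw [hvm]
            exact hstackS
        refine ⟨fun h0 => absurd h0 hbr_103b10, fun _ => ⟨fun hc => ?_, fun _ hfit => absurd hfit hnf, fun _ _ => hfail⟩⟩
        exfalso
        omega
    case cont =>
      -- the capacity suffices: in place (`ProgX.Base.Spec.Proved.realloc.realloc_inplace_w`)
      have hm : r16 (u.reg .rsi).toNat ≤ c := by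
        rw [ProgX.Spec.r16_word _ (by omega), Nat.mod_eq_of_lt (by omega)] at hbr_103b36
        exact hbr_103b36
      refine ProgX.Base.Spec.Proved.realloc.realloc_inplace_w Lay hLay μ hμ u₀ hcode hpoison hunpoison H rest frames n c u ret he0 hp hlc hm
        s_103b36 rv w_rip w_rsp w_rbx w_rbp w_rax hrax (w_kept.mono_all (by rfl)) ?_ ?_ ?_ ?_ ?_ ?_ ?_ w_eq ?_ ?_
      · u_frame he_retAddr
      · u_resolve
      · u_resolve
      · u_resolve
      · u_resolve
      · rw [w_flags]
        simp only [X86.User.df_setStatus]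
        exact w_df
      · rw [w_mxcsr]
        exact w_mx
      · v_untouched
      · u_same
    case cont =>
      -- the object must move: `heap_alloc(m, 2 * r16 m)`
      have hr13 : (u.reg .rsi + 15 &&& 18446744073709551600).toNat = r16 (u.reg .rsi).toNat := ProgX.Spec.r16_word _ (by omega)
      have hlt : c < r16 (u.reg .rsi).toNat := by
        rw [hr13, Nat.mod_eq_of_lt (by omega)] at hbr_103b36
        exact hbr_103b36
      have hlem := le_r16 (u.reg .rsi).toNat
      have hltm := r16_lt (u.reg .rsi).toNat
      have hm16 := r16_mod (u.reg .rsi).toNat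
      obtain ⟨R, hR⟩ : ∃ R, r16 (u.reg .rsi).toNat = R := ⟨_, rfl⟩
      rw [hR] at hr13 hlt hlem hltm hm16
      obtain ⟨w13, hw13⟩ : ∃ w13 : Word, (u.reg .rsi + 15 &&& 18446744073709551600) = w13 := ⟨_, rfl⟩
      rw [hw13] at hr13 w_r13
      clear hmemeq hbr_103b36
      have hmtail := ProgX.Base.Spec.Proved.realloc.realloc_move_tail_w Lay hLay μ hμ u₀ hcode h_memcpy h_free H rest frames n c u ret he0 hp hlc
        (by rw [hR]; exact hlt)
      u_walk hcode [hμ.vendor] until [ProgX.Base.L.realloc.cut3, ProgX.Base.L.realloc.cut2] span [ProgX.Base.L.textLo, ProgX.Base.L.textHi] side (v_side)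
      case call_inv =>
        v_inv
      case pre_103b40 =>
        -- the precondition of `heap_alloc(m, 2 * r16 m)`
        refine ⟨hp.callee (by v_untouched) ?_ ?_ ?_ ?_, ?_, ?_, ?_⟩
        · rw [hbase, hlimit]
          u_memnorm
          u_eqon
        · rw [w_rsp]
          u_omega
        · rw [w_rsp]
          u_omega
        · rw [w_rsp]
          u_omega
        · rw [w_rdi, w_rsi, hR]
          u_omega
        · rw [w_rsi]
          u_omega
        · rw [w_rsi]
          u_omega
      case cont =>
        -- after the first `heap_alloc`
        have hcapv : (s_103b40.reg .rsi).toNat = 2 * R := by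
          rw [w_rsi_103b40]
          u_omega
        have hpost : ProgX.Spec.AllocPost H rest frames 16 (u.reg .rsi).toNat (2 * R) s_103b40 s_103b40r := by
          have this : ProgX.Spec.AllocPost H rest frames 16 (s_103b40.reg .rdi).toNat (s_103b40.reg .rsi).toNat s_103b40 s_103b40r :=
            w_post
          rw [hcapv, w_rdi_103b40] at this
          exact this
        clear w_post
        have e8 : (s_103b40.reg .rsp).toNat + 8 = (u.reg .rsp).toNat - 40 := by
          rw [w_rsp_103b40]
          u_omega
        obtain ⟨rv2, hrv2⟩ : ∃ rv2, s_103b40r.reg .rax = rv2 := ⟨_, rfl⟩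
        v_after_call w_rsp_103b40 w_mem_103b40
        simp only [shadowSpan, Heap.next_def, hbase, w_rdi_103b40] at w_same
        have hsame1 := w_same
        clear w_same
        have q0 : UInt64.ofNat (s_103b40r.mem.readLE (u.reg .rsp) 8) = ret := by
          u_frame he_retAddr
        have p1 : UInt64.ofNat (s_103b40.mem.readLE (u.reg .rsp - 8) 8) = u.reg .r13 := by u_resolve
        have q1 : UInt64.ofNat (s_103b40r.mem.readLE (u.reg .rsp - 8) 8) = u.reg .r13 := by
          rw [w_mem_103b40] at p1
          u_frame p1
        have p2 : UInt64.ofNat (s_103b40.mem.readLE (u.reg .rsp - 16) 8) = u.reg .r12 := by u_resolve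
        have q2 : UInt64.ofNat (s_103b40r.mem.readLE (u.reg .rsp - 16) 8) = u.reg .r12 := by
          rw [w_mem_103b40] at p2
          u_frame p2
        have p3 : UInt64.ofNat (s_103b40.mem.readLE (u.reg .rsp - 24) 8) = u.reg .rbp := by u_resolve
        have q3 : UInt64.ofNat (s_103b40r.mem.readLE (u.reg .rsp - 24) 8) = u.reg .rbp := by
          rw [w_mem_103b40] at p3
          u_frame p3
        have p4 : UInt64.ofNat (s_103b40.mem.readLE (u.reg .rsp - 32) 8) = u.reg .rbx := by u_resolve
        have q4 : UInt64.ofNat (s_103b40r.mem.readLE (u.reg .rsp - 32) 8) = u.reg .rbx := by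
          rw [w_mem_103b40] at p4
          u_frame p4
        by_cases hfit2 : H.Fits (2 * R)
        · -- twice the room fits: the tail of the move with `c' = 2 * r16 m`
          obtain ⟨k1, k2⟩ := hpost.1 hfit2
          rw [hrv2] at k1
          rw [e8] at k2
          obtain ⟨r1, r2, r3, r4, r5⟩ := hok.next_range hfit2
          have hq : rv2.toNat = H.next := k1
          rw [Heap.next_def, hbase] at r1 r2 r3 r4 r5 k1
          have hcap : 2 * R = H.moveCap (u.reg .rsi).toNat := by
            unfold Heap.moveCap
            rw [hR, if_pos hfit2]
          clear hpost
          u_walk hcode [hμ.vendor] until [ProgX.Base.L.realloc.cut3, ProgX.Base.L.realloc.cut2] span [ProgX.Base.L.textLo, ProgX.Base.L.textHi] side (v_side)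
          refine hmtail (2 * R) hfit2 (by rw [hR]; omega) hcap s_103b48 rv2 rv w_rip w_rsp w_rbx w_rax hq w_r12 hrax
            (w_kept.mono_all (by rfl)) ?_ ?_ ?_ ?_ ?_ ?_ ?_ w_eq ?_ ?_
          · rw [w_mem]
            exact q0
          · rw [w_mem]
            exact q1
          · rw [w_mem]
            exact q2
          · rw [w_mem]
            exact q3
          · rw [w_mem]
            exact q4
          · rw [w_flags]
            simp only [X86.User.df_setStatus]
            exact w_df
          · rw [w_mxcsr]
            exact w_mx
          · rw [w_mem]
            exact k2
          · rw [w_mem]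
            u_same
        · -- it does not: nothing changed; `heap_alloc(m, r16 m)`
          obtain ⟨k1, k2, k3, k4⟩ := hpost.2 hfit2
          rw [hrv2] at k1
          rw [e8] at k2
          rw [w_rsp_103b40, w_mem_103b40] at k4
          rw [w_mem_103b40] at k3
          clear hpost hsame1
          have hunA : ShadowUntouched u.mem s_103b40r.mem := by
            refine Mem.EqOn.trans ?_ k3
            u_eqon
          u_walk hcode [hμ.vendor] until [ProgX.Base.L.realloc.cut3, ProgX.Base.L.realloc.cut2] span [ProgX.Base.L.textLo, ProgX.Base.L.textHi] side (v_side)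
          case call_inv =>
            v_inv
          case pre_103b50 =>
            -- the precondition of `heap_alloc(m, r16 m)`
            have et : (s_103b50.reg .rsp).toNat + 8 = (u.reg .rsp).toNat - 40 := by
              rw [w_rsp]
              u_omega
            have step := k2.writeLE_out (u.reg .rsp - 48) 8 1063765 (by u_omega)
              (by rw [hbase]; left; u_omega) (by left; u_omega)
            refine ⟨⟨by rw [w_mem, et]; exact step, hbase, hlimit, hp.text, hp.offText⟩, ?_, ?_, ?_⟩
            · rw [w_rdi, w_rsi, hR, hr13]
              exact Nat.le_refl _
            · rw [w_rsi, hr13]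
              exact hm16
            · rw [w_rsi, hr13]
              omega
          case cont =>
            -- after the second `heap_alloc`
            have hpost2 : ProgX.Spec.AllocPost H rest frames 16 (u.reg .rsi).toNat R s_103b50 s_103b50r := by
              have this : ProgX.Spec.AllocPost H rest frames 16 (s_103b50.reg .rdi).toNat (s_103b50.reg .rsi).toNat s_103b50
                  s_103b50r := w_post
              rw [w_rsi_103b50, hr13, w_rdi_103b50] at this
              exact this
            clear w_post
            have e82 : (s_103b50.reg .rsp).toNat + 8 = (u.reg .rsp).toNat - 40 := by
              rw [w_rsp_103b50]
              u_omega
            obtain ⟨rv3, hrv3⟩ : ∃ rv3, s_103b50r.reg .rax = rv3 := ⟨_, rfl⟩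
            v_after_call w_rsp_103b50 w_mem_103b50
            simp only [shadowSpan, Heap.next_def, hbase, w_rdi_103b50] at w_same
            have t0 : UInt64.ofNat (s_103b50r.mem.readLE (u.reg .rsp) 8) = ret := by
              u_frame q0
            have t1 : UInt64.ofNat (s_103b50r.mem.readLE (u.reg .rsp - 8) 8) = u.reg .r13 := by
              u_frame q1
            have t2 : UInt64.ofNat (s_103b50r.mem.readLE (u.reg .rsp - 16) 8) = u.reg .r12 := by
              u_frame q2
            have t3 : UInt64.ofNat (s_103b50r.mem.readLE (u.reg .rsp - 24) 8) = u.reg .rbp := by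
              u_frame q3
            have t4 : UInt64.ofNat (s_103b50r.mem.readLE (u.reg .rsp - 32) 8) = u.reg .rbx := by
              u_frame q4
            by_cases hfitR : H.Fits R
            · -- the exact room fits: the tail of the move with `c' = r16 m`
              obtain ⟨j1, j2⟩ := hpost2.1 hfitR
              rw [hrv3] at j1
              rw [e82] at j2
              obtain ⟨r1, r2, r3, r4, r5⟩ := hok.next_range hfitR
              have hq : rv3.toNat = H.next := j1
              rw [Heap.next_def, hbase] at r1 r2 r3 r4 r5 j1
              have hcap : R = H.moveCap (u.reg .rsi).toNat := by
                unfold Heap.moveCap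
                rw [hR, if_neg hfit2]
              clear hpost2
              u_walk hcode [hμ.vendor] until [ProgX.Base.L.realloc.cut3, ProgX.Base.L.realloc.cut2] span [ProgX.Base.L.textLo, ProgX.Base.L.textHi] side (v_side)
              refine hmtail R hfitR (by rw [hR]; exact Nat.le_refl _) hcap s_103b58 rv3 rv w_rip w_rsp w_rbx w_rax hq
                w_r12 hrax (w_kept.mono_all (by rfl)) ?_ ?_ ?_ ?_ ?_ ?_ ?_ w_eq ?_ ?_
              · rw [w_mem]
                exact t0
              · rw [w_mem]
                exact t1
              · rw [w_mem]
                exact t2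
              · rw [w_mem]
                exact t3
              · rw [w_mem]
                exact t4
              · rw [w_flags]
                simp only [X86.User.df_setStatus]
                exact w_df
              · rw [w_mxcsr]
                exact w_mx
              · rw [w_mem]
                exact j2
              · rw [w_mem]
                u_same
            · -- nor does it: NULL, nothing changed
              obtain ⟨j1, j2, j3, j4⟩ := hpost2.2 hfitR
              rw [hrv3] at j1
              rw [e82] at j2
              rw [w_rsp_103b50, w_mem_103b50] at j4
              rw [w_mem_103b50] at j3
              clear hpost2
              have hunB : ShadowUntouched u.mem s_103b50r.mem := by
                refine (hunA.trans ?_).trans j3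
                exact eqOn_shadow_writeLE _ _ _ _ (by u_omega) (by left; u_omega)
              have hnf : ¬ H.Fits (r16 (u.reg .rsi).toNat) := by
                rw [hR]
                exact hfitR
              u_walk hcode [hμ.vendor] until [ProgX.Base.L.realloc.cut3, ProgX.Base.L.realloc.cut2] span [ProgX.Base.L.textLo, ProgX.Base.L.textHi] side (v_side)
              have hstackF : Mem.SameExcept [⟨(u.reg .rsp).toNat - 128, (u.reg .rsp).toNat⟩] u.mem s_103b50r.mem := by
                u_same
              refine hepi s_103bb9 (Word.ofBV 0#32) w_rip w_rsp w_rbp (w_kept.mono_all (by rfl)) ?_ ?_ ?_ ?_ ?_ ?_ ?_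
                w_eq ?_ ?_
              · rw [w_mem]
                exact t0
              · rw [w_mem]
                exact t1
              · rw [w_mem]
                exact t2
              · rw [w_mem]
                exact t3
              · rw [w_mem]
                exact t4
              · rw [w_flags]
                simp only [X86.User.df_setStatus]
                exact w_df
              · rw [w_mxcsr]
                exact w_mx
              · rw [w_mem]
                simp only [X86.User.Spec.footprint, vspec, shadowSpan, Heap.next_def, hbase]
                u_same
              · intro v hvm hvr
                have hfail : ProgX.Spec.FailPost H rest frames 128 u v := by
                  refine ⟨hvr.trans rfl, ?_, ?_, ?_⟩
                  · rw [hvm, w_mem]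
                    exact hp.raise_back j2 (by omega)
                  · rw [hvm, w_mem]
                    exact hunB
                  · rw [hvm, w_mem]
                    exact hstackF
                refine ⟨fun h0 => absurd h0 hbr_103b10, fun _ => ⟨fun hc => ?_, fun _ hfit => absurd hfit hnf,
                  fun _ _ => hfail⟩⟩
                exfalso
                rw [hR] at hc
                omega
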